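-- pv_equiv track=rewrite | github.com/pzbroch/Podstawy_Pythona_PRZYKLADOWY | answers.py | revers_sentence
-- ===== SOURCE A (Python) =====
-- def revers_sentence(inStr):
--     outStr = ''
--     for x in range(len(inStr)-1,-1,-1):
--         if (x == len(inStr)-1) or (inStr[x+1] == ' '):
--             outStr = outStr + inStr[x].upper()
--         else:
--             outStr = outStr + inStr[x].lower()
--     return outStr
-- ===== SOURCE B (Python) =====
-- def revers_sentence(inStr):
--     words = inStr[::-1].split(' ')
--     return ' '.join(w[:1].upper() + w[1:].lower() for w in words)
-- ===== Notes on version B (the rewrite author's own statement) =====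
-- stated objective: faster
-- what changed: Replaced A's index loop (which peeks at the right neighbour and grows the output by repeated string concatenation) with: reverse the string once, split on the single-space separator into tokens (keeping empty tokens), capitalize each token (first char upper, rest lower), and join the tokens back.
import Mathlib
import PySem

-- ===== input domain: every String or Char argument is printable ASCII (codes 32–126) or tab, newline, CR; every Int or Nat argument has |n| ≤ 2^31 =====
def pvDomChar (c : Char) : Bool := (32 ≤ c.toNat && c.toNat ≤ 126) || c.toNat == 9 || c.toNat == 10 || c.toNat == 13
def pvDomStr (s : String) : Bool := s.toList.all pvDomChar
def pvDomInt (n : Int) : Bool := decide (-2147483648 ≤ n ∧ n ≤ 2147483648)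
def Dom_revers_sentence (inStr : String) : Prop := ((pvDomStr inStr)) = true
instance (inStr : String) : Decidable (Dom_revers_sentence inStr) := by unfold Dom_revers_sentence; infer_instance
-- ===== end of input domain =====

-- B reverses the string once, splits it on ' ', capitalizes each token and joins with ' ';
-- A scans indices right-to-left peeking at the right neighbour. Proven equal on all of Dom.

-- ===== PORT A =====
-- outStr = ''; for x in range(len(inStr)-1,-1,-1): append inStr[x].upper() if (x==len-1 or inStr[x+1]==' ') else inStr[x].lower()
-- (indices x and x+1 are always in range when accessed, so pyGetD's default is never used)
def revers_sentence (inStr : String) : String :=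
  let l := inStr.toList
  let n : Int := (l.length : Int)
  String.mk ((PySem.List.pyRange (n - 1) (-1) (-1)).foldl
    (fun outStr x =>
      if x == n - 1 || PySem.List.pyGetD l (x + 1) ' ' == ' ' then
        outStr ++ PySem.Chars.upper [PySem.List.pyGetD l x ' ']
      else
        outStr ++ PySem.Chars.lower [PySem.List.pyGetD l x ' ']) [])

-- ===== PORT B =====
-- words = inStr[::-1].split(' ');  return ' '.join(w[:1].upper() + w[1:].lower() for w in words)
def revers_sentence_alt (inStr : String) : String :=
  let rev := inStr.toList.reverse          -- inStr[::-1]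
  let words := PySem.Chars.splitOn rev [' ']
  String.mk (PySem.Chars.join [' ']
    (words.map (fun w =>
      PySem.Chars.upper (PySem.List.slice w none (some 1)) ++
      PySem.Chars.lower (PySem.List.slice w (some 1) none))))

-- ===== PRECONDITION & SPEC =====
def Spec_revers_sentence (inStr : String) (out : String) : Prop := out = revers_sentence_alt inStr
instance (inStr : String) (out : String) : Decidable (Spec_revers_sentence inStr out) := by unfold Spec_revers_sentence; infer_instance

-- ===== CLAIM (what is proved, stated in full; the proofs are below) =====
def Claim_equal_revers_sentence : Prop := ∀ (inStr : String), Dom_revers_sentence inStr → Spec_revers_sentence inStr (revers_sentence inStr)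

-- ===== LEMMAS AND PROOFS =====

-- Common specification: process the (already reversed) char list left to right,
-- uppercasing when the previous char was a space (or at the start), lowercasing otherwise.
def capSpec : Bool → List Char → List Char
  | _, [] => []
  | b, c :: cs =>
      (if b then PySem.Chars.upperChar c else PySem.Chars.lowerChar c) :: capSpec (c == ' ') cs

-- simple structural version of split-on-single-space, carrying the current (reversed) token
def spl : List Char → List Char → List (List Char)
  | [], cur => [cur.reverse]
  | c :: rest, cur => if c = ' ' then cur.reverse :: spl rest [] else spl rest (c :: cur)

def capWord (w : List Char) : List Char :=
  PySem.Chars.upper (w.take 1) ++ PySem.Chars.lower (w.drop 1)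

lemma spl_ne_nil : ∀ (l cur : List Char), spl l cur ≠ [] := by
  intro l
  induction l with
  | nil => intro cur; simp [spl]
  | cons c rest ih =>
      intro cur
      by_cases hc : c = ' ' <;> simp [spl, hc, ih]

lemma go_eq_spl : ∀ (fuel : Nat) (l cur : List Char) (acc : List (List Char)), l.length < fuel →
    PySem.Chars.splitOn.go [' '] fuel l cur acc = acc.reverse ++ spl l cur := by
  intro fuel
  induction fuel with
  | zero => intro l cur acc h; exact absurd h (by omega)
  | succ fuel ih =>
      intro l cur acc h
      cases l with
      | nil => simp [PySem.Chars.splitOn.go, spl]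
      | cons c rest =>
          have hlen : rest.length < fuel := by
            simpa using Nat.lt_of_succ_lt_succ h
          by_cases hc : c = ' '
          · subst hc
            rw [PySem.Chars.splitOn.go]
            rw [show ([' '].isPrefixOf (' ' :: rest)) = true by simp [List.isPrefixOf]]
            rw [if_pos rfl]
            rw [show List.drop [' '].length (' ' :: rest) = rest by simp]
            rw [ih rest [] (cur.reverse :: acc) hlen]
            simp [spl]
          · rw [PySem.Chars.splitOn.go]
            rw [show ([' '].isPrefixOf (c :: rest)) = false by
              simp [List.isPrefixOf, BEq.beq]; exact fun h' => (hc h'.symm)]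
            simp only [Bool.false_eq_true, if_false]
            rw [ih rest (c :: cur) acc hlen]
            simp [spl, hc]

lemma splitOn_eq_spl (l : List Char) : PySem.Chars.splitOn l [' '] = spl l [] := by
  have := go_eq_spl (l.length + 1) l [] [] (by omega)
  simpa [PySem.Chars.splitOn] using this

lemma capWord_nil : capWord [] = [] := by
  simp [capWord, PySem.Chars.upper, PySem.Chars.lower]

lemma capWord_singleton (c : Char) : capWord [c] = [PySem.Chars.upperChar c] := by
  simp [capWord, PySem.Chars.upper, PySem.Chars.lower]

lemma capWord_snoc (w : List Char) (c : Char) (hw : w ≠ []) :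
    capWord (w ++ [c]) = capWord w ++ [PySem.Chars.lowerChar c] := by
  cases w with
  | nil => exact absurd rfl hw
  | cons d ws => simp [capWord, PySem.Chars.upper, PySem.Chars.lower]

lemma space_upper : PySem.Chars.upperChar ' ' = ' ' := by decide

lemma space_lower : PySem.Chars.lowerChar ' ' = ' ' := by decide

lemma join_map_spl : ∀ (l cur : List Char),
    PySem.Chars.join [' '] ((spl l cur).map capWord) =
      capWord cur.reverse ++ capSpec (decide (cur = [])) l := by
  intro l
  induction l with
  | nil =>
      intro cur
      simp [spl, capSpec, PySem.Chars.join_singleton]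
  | cons c rest ih =>
      intro cur
      by_cases hc : c = ' '
      · subst hc
        obtain ⟨z, zs, hz⟩ : ∃ z zs, spl rest [] = z :: zs := by
          cases h : spl rest [] with
          | nil => exact absurd h (spl_ne_nil rest [])
          | cons z zs => exact ⟨z, zs, rfl⟩
        have hj := ih ([] : List Char)
        rw [hz] at hj
        simp only [List.map_cons] at hj
        have hspl : spl (' ' :: rest) cur = cur.reverse :: spl rest [] := by simp [spl]
        rw [hspl, hz, List.map_cons, List.map_cons, PySem.Chars.join_cons_cons, hj]
        simp [capSpec, space_upper, space_lower, capWord_nil, ite_self]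
      · rw [show spl (c :: rest) cur = spl rest (c :: cur) by simp [spl, hc]]
        rw [ih (c :: cur)]
        have hcs : (c == ' ') = false := by simpa using hc
        cases hcur : cur with
        | nil =>
            simp [capWord_nil, capWord_singleton, capSpec, hcs]
        | cons d ds =>
            rw [List.reverse_cons, capWord_snoc ((d :: ds).reverse) c (by simp)]
            simp [capSpec, hcs]

lemma foldA_eq_capSpec (l : List Char) : ∀ (k : Nat), k < l.length → ∀ (b : Bool) (acc : List Char),
    b = ((k : Int) == (l.length : Int) - 1 || PySem.List.pyGetD l ((k : Int) + 1) ' ' == ' ') →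
    (PySem.List.pyRange (k : Int) (-1) (-1)).foldl
      (fun outStr x =>
        if x == (l.length : Int) - 1 || PySem.List.pyGetD l (x + 1) ' ' == ' ' then
          outStr ++ PySem.Chars.upper [PySem.List.pyGetD l x ' ']
        else
          outStr ++ PySem.Chars.lower [PySem.List.pyGetD l x ' ']) acc
    = acc ++ capSpec b ((l.take (k + 1)).reverse) := by
  intro k
  induction k with
  | zero =>
      intro hk b acc hb
      rw [PySem.List.pyRange_neg_one_cons (by norm_num), PySem.List.pyRange_neg_one_eq_nil (by norm_num)]
      obtain ⟨d, ls, rfl⟩ : ∃ d ls, l = d :: ls := by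
        cases l with
        | nil => simp at hk
        | cons d ls => exact ⟨d, ls, rfl⟩
      have hget : PySem.List.pyGetD (d :: ls) (0 : Int) ' ' = d := by
        simp [PySem.List.pyGetD, PySem.List.pyIdx?, PySem.List.pyGet?]
      simp only [List.foldl, Nat.cast_zero] at *
      rw [← hb, hget]
      cases b <;> simp [capSpec, PySem.Chars.upper, PySem.Chars.lower]
  | succ k ih =>
      intro hk b acc hb
      rw [PySem.List.pyRange_neg_one_cons (by push_cast; omega)]
      have hcast : ((k + 1 : Nat) : Int) - 1 = (k : Nat) := by push_cast; ring
      have hget : PySem.List.pyGetD l ((k + 1 : Nat) : Int) ' ' = l.getD (k + 1) ' ' := by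
        rw [PySem.List.pyGetD_natCast]
      have hb' : (l.getD (k + 1) ' ' == ' ') =
          ((k : Int) == (l.length : Int) - 1 || PySem.List.pyGetD l ((k : Int) + 1) ' ' == ' ') := by
        have h1 : ((k : Int) == (l.length : Int) - 1) = false := by
          simp only [beq_eq_false_iff_ne, ne_eq]
          intro hEq
          have : k = l.length - 1 := by omega
          omega
        have h2 : PySem.List.pyGetD l ((k : Int) + 1) ' ' = l.getD (k + 1) ' ' := by
          rw [show ((k : Int) + 1) = ((k + 1 : Nat) : Int) by push_cast; ring]
          rw [PySem.List.pyGetD_natCast]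
        rw [h1, h2, Bool.false_or]
      have htake : (l.take (k + 1 + 1)).reverse = l.getD (k + 1) ' ' :: (l.take (k + 1)).reverse := by
        have hlt : k + 1 < l.length := hk
        rw [List.take_succ]
        have : l[k+1]?.toList = [l.getD (k + 1) ' '] := by
          rw [List.getElem?_eq_getElem hlt]
          simp [List.getD, List.getElem?_eq_getElem hlt]
        rw [this]
        simp
      have hbody : (PySem.List.pyRange ((k : Nat) : Int) (-1) (-1)).foldl
          (fun outStr x =>
            if x == (l.length : Int) - 1 || PySem.List.pyGetD l (x + 1) ' ' == ' ' then
              outStr ++ PySem.Chars.upper [PySem.List.pyGetD l x ' ']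
            else
              outStr ++ PySem.Chars.lower [PySem.List.pyGetD l x ' '])
          (acc ++ [if b then PySem.Chars.upperChar (l.getD (k + 1) ' ')
                   else PySem.Chars.lowerChar (l.getD (k + 1) ' ')])
          = (acc ++ [if b then PySem.Chars.upperChar (l.getD (k + 1) ' ')
                   else PySem.Chars.lowerChar (l.getD (k + 1) ' ')])
            ++ capSpec (l.getD (k + 1) ' ' == ' ') ((l.take (k + 1)).reverse) :=
        ih (by omega) (l.getD (k + 1) ' ' == ' ') _ hb'
      rw [List.foldl_cons]
      have hstep : (if ((k + 1 : Nat) : Int) == (l.length : Int) - 1 || PySem.List.pyGetD l (((k + 1 : Nat) : Int) + 1) ' ' == ' ' then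
              acc ++ PySem.Chars.upper [PySem.List.pyGetD l ((k + 1 : Nat) : Int) ' ']
            else
              acc ++ PySem.Chars.lower [PySem.List.pyGetD l ((k + 1 : Nat) : Int) ' '])
          = acc ++ [if b then PySem.Chars.upperChar (l.getD (k + 1) ' ')
                   else PySem.Chars.lowerChar (l.getD (k + 1) ' ')] := by
        rw [← hb, hget]
        cases b <;> simp [PySem.Chars.upper, PySem.Chars.lower]
      rw [hcast, hstep, hbody, htake]
      cases b <;> simp [capSpec]

-- ===== VERDICT (by name: the statement is the Claim_ definition above) =====
theorem revers_sentence_spec : Claim_equal_revers_sentence := by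
  intro inStr _
  unfold Spec_revers_sentence revers_sentence revers_sentence_alt
  simp only []
  have hslice : ∀ w : List Char,
      PySem.Chars.upper (PySem.List.slice w none (some 1)) ++
        PySem.Chars.lower (PySem.List.slice w (some 1) none) = capWord w := by
    intro w
    have h1 : PySem.List.slice w none (some 1) = w.take 1 := by
      rw [PySem.List.slice_to] <;> norm_num
    have h2 : PySem.List.slice w (some 1) none = w.drop 1 := by
      rw [PySem.List.slice_from] <;> norm_num
    rw [h1, h2]; rfl
  simp only [hslice]
  cases hl : inStr.toList with
  | nil =>
      rw [splitOn_eq_spl]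
      rw [show ((List.length ([] : List Char) : Int) - 1) = (-1 : Int) by simp]
      rw [PySem.List.pyRange_neg_one_eq_nil (by norm_num)]
      simp [spl, capWord_nil, PySem.Chars.join_singleton]
  | cons d ls =>
      rw [splitOn_eq_spl, join_map_spl]
      have hlen : (d :: ls).length - 1 < (d :: ls).length := by simp
      have hcast2 : ((d :: ls).length : Int) - 1 = (((d :: ls).length - 1 : Nat) : Int) := by
        simp only [List.length_cons]; push_cast; omega
      have hfold := foldA_eq_capSpec (d :: ls) ((d :: ls).length - 1) hlen true ([] : List Char)
        (by rw [← hcast2]; simp)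
      rw [show PySem.List.pyRange (((d :: ls).length : Int) - 1) (-1) (-1)
            = PySem.List.pyRange ((((d :: ls).length - 1 : Nat) : Int)) (-1) (-1) by rw [hcast2]]
      rw [hfold]
      rw [show (d :: ls).take ((d :: ls).length - 1 + 1) = d :: ls by
        apply List.take_of_length_le; simp]
      simp [capWord_nil]
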